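-- pv_equiv track=rewrite | github.com/AlenaReshetnikova/Stepik_Python_basics_for_students | 5.10_truck_for_transportation.py | get_weights_on_truck
-- ===== SOURCE A (Python) =====
-- def get_weights_on_truck(max_weight, items):
--     # adding heaviest items with weight between 310 - 320
--     items.sort(reverse=True)
--     if items == []:
--         return 0, 0
--     weight_in_truck = 0
--     truck = []
--     items_left = []
--     for i in items:
--         if 310 <= i <= 320:
--             if weight_in_truck + i <= max_weight:
--                 truck.append(i)
--                 weight_in_truck += i
--         else:
--             items_left.append(i)
--     max_weight -= weight_in_truck
--     items_left = list(filter(lambda i: i <= max_weight, items_left))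
--     placement_options = []
--     if max_weight < items_left[0]:
--         return len(truck), sum(truck)
--     if max_weight == items_left[0]:
--         return len(truck) + 1, sum(truck) + items_left[0]
--     placement_options.append((items_left[0],))
--     for item in items_left[1:]:
--         new_options = []
--         for option in placement_options:
--             try_option = (*option, item)
--             if sum(try_option) <= max_weight and try_option not in placement_options:
--                 new_options.append(try_option)
--         placement_options += new_options
--         if (item,) not in placement_options:
--             placement_options.append((item,))
--     max_option_len = max(map(len, placement_options))
--     max_len_options = list(filter(lambda i: len(i) == max_option_len, placement_options))
--
--     weight = max(map(sum, max_len_options))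
--     #heavyest_option = sorted([i for i in max_len_options if sum(i) == weight])[::-1][0]
--     weight += sum(truck)
--     number_of_items = max_option_len + len(truck)
--
--     return number_of_items, weight
-- ===== SOURCE B (Python) =====
-- def get_weights_on_truck(max_weight, items):
--     # DP over (count, total-weight) states instead of enumerating all subsets.
--     # Note: return-value equivalence only; A sorts `items` in place, B does not mutate it.
--     order = sorted(items, reverse=True)
--     if not order:
--         return 0, 0
--     t_count = 0
--     t_weight = 0
--     for i in order:
--         if 310 <= i <= 320 and t_weight + i <= max_weight:
--             t_count += 1
--             t_weight += i
--     cap = max_weight - t_weight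
--     rest = [i for i in order if not (310 <= i <= 320) and i <= cap]
--     if not rest:
--         # A raises IndexError here; returning the loaded truck is the sensible value.
--         return t_count, t_weight
--     states = set()
--     for x in rest:
--         states |= {(c + 1, s + x) for (c, s) in states if s + x <= cap}
--         states.add((1, x))
--     best_c = max(c for c, _ in states)
--     best_s = max(s for c, s in states if c == best_c)
--     return t_count + best_c, t_weight + best_s
-- ===== Notes on version B (the rewrite author's own statement) =====
-- stated objective: faster
-- what changed: A enumerates every feasible sub-tuple of the leftover items (with quadratic 'not in' dedup scans) and then scans for the longest/heaviest; B replaces the whole enumeration by a dynamic program over a set of reachable (count, weight) states, merging all loadings with equal count and weight into one state.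
-- intended difference: When the residual capacity after pre-loading the 310-320 items equals the largest remaining fitting item and some two remaining items also fit together, A returns early with just that one extra item (e.g. (1,10) on max_weight=10, items=[10,5,5]) while B returns the maximal item count (2,10), which is the intended max-count-then-max-weight loading. — e.g. on get_weights_on_truck(10, [10, 5, 5]): A returns (1, 10), B returns (2, 10)
import Mathlib
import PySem

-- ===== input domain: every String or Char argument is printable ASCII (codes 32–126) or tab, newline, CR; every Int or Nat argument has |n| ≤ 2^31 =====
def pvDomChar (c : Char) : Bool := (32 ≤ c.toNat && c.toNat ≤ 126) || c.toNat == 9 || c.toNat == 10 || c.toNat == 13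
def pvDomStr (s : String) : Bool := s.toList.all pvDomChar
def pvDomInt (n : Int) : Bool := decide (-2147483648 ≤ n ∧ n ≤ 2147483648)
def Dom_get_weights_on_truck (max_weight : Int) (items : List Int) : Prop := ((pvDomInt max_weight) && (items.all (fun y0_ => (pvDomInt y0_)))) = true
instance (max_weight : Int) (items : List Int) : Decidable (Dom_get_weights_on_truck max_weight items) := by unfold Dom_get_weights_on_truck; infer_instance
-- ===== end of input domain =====

-- B replaces A's exponential enumeration of all feasible sub-tuples by a DP over reachable
-- (count, weight) states (objective: faster). Return-value equivalence only: A sorts `items`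
-- in place, B does not mutate its argument.

-- ===== PORT A =====
-- one step of A's greedy 310–320 pre-loading loop, state (truck, weight_in_truck, items_left)
def pvAload (max_weight : Int) (st : List Int × Int × List Int) (i : Int) : List Int × Int × List Int :=
  if 310 ≤ i ∧ i ≤ 320 then
    if st.2.1 + i ≤ max_weight then (st.1 ++ [i], st.2.1 + i, st.2.2) else st
  else (st.1, st.2.1, st.2.2 ++ [i])

-- one step of A's `for item in items_left[1:]` loop over placement_options
def pvAstep (cap : Int) (opts : List (List Int)) (item : Int) : List (List Int) :=
  let new_options := opts.foldl (fun acc o =>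
    if o.sum + item ≤ cap ∧ (o ++ [item]) ∉ opts then acc ++ [o ++ [item]] else acc) []
  let opts2 := opts ++ new_options
  if [item] ∉ opts2 then opts2 ++ [[item]] else opts2

def get_weights_on_truck (max_weight : Int) (items : List Int) : Int × Int :=
  let its := PySem.List.sorted items (fun x => x) true
  if its = [] then (0, 0) else
    let st := its.foldl (pvAload max_weight) ([], 0, [])
    let truck := st.1
    let cap := max_weight - st.2.1
    let items_left := st.2.2.filter (fun i => decide (i ≤ cap))
    match items_left with
    | [] => (0, 0)  -- Python raises IndexError on items_left[0] here; excluded by Pre_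
    | i0 :: rest =>
      if cap < i0 then ((truck.length : Int), truck.sum)
      else if cap = i0 then ((truck.length : Int) + 1, truck.sum + i0)
      else
        let options := rest.foldl (pvAstep cap) [[i0]]
        let m := (PySem.List.max? (options.map (fun o => (o.length : Int))) (fun v => v)).getD 0
        let maxlen := options.filter (fun o => decide ((o.length : Int) = m))
        let weight := (PySem.List.max? (maxlen.map (fun o => o.sum)) (fun v => v)).getD 0
        (m + (truck.length : Int), weight + truck.sum)

-- ===== PORT B =====
-- one step of B's greedy pre-loading, state (count, weight)
def pvBload (max_weight : Int) (t : Int × Int) (i : Int) : Int × Int :=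
  if (310 ≤ i ∧ i ≤ 320) ∧ t.2 + i ≤ max_weight then (t.1 + 1, t.2 + i) else t

-- one DP step: states |= {(c+1, s+x) for (c,s) in states if s+x <= cap}; states.add((1,x))
def pvBstep (cap : Int) (S : PySem.Set (Int × Int)) (x : Int) : PySem.Set (Int × Int) :=
  PySem.Set.add
    (S.foldl (fun S' (p : Int × Int) =>
      if p.2 + x ≤ cap then PySem.Set.add S' (p.1 + 1, p.2 + x) else S') S)
    (1, x)

def get_weights_on_truck_alt (max_weight : Int) (items : List Int) : Int × Int :=
  let order := PySem.List.sorted items (fun x => x) true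
  if order = [] then (0, 0) else
    let t := order.foldl (pvBload max_weight) (0, 0)
    let cap := max_weight - t.2
    let rest := order.filter (fun i => decide (¬(310 ≤ i ∧ i ≤ 320) ∧ i ≤ cap))
    if rest = [] then t else
      let states := rest.foldl (pvBstep cap) PySem.Set.empty
      let bestC := (PySem.List.max? (states.map (fun p => p.1)) (fun v => v)).getD 0
      let bestS := (PySem.List.max? ((states.filter (fun p => decide (p.1 = bestC))).map (fun p => p.2)) (fun v => v)).getD 0
      (t.1 + bestC, t.2 + bestS)

-- ===== PRECONDITION & SPEC =====
-- residual room once the 310-320 band has been greedily pre-loaded, largest first; the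
-- crash/difference conditions below depend on this quantity, which no closed form avoids
def pvResidual (room : Int) (ws : List Int) : Int :=
  match ws with
  | [] => room
  | a :: rest =>
      if 310 ≤ a ∧ a ≤ 320 ∧ a ≤ room then pvResidual (room - a) rest
      else pvResidual room rest

def pvCap (max_weight : Int) (items : List Int) : Int :=
  pvResidual max_weight (PySem.List.sorted items (fun z => z) true)

-- Pre_ excludes exactly the inputs where A raises IndexError on items_left[0]: a nonempty
-- items list in which no item outside the 310-320 band fits the residual capacity.
-- (B returns the already loaded truck there, e.g. (1, 315) for max_weight=400, items=[315].)
def Pre_get_weights_on_truck (max_weight : Int) (items : List Int) : Prop :=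
  items = [] ∨ ∃ x ∈ items, ¬(310 ≤ x ∧ x ≤ 320) ∧ x ≤ pvCap max_weight items
instance (max_weight : Int) (items : List Int) : Decidable (Pre_get_weights_on_truck max_weight items) := by
  unfold Pre_get_weights_on_truck; infer_instance

def pvWitness_get_weights_on_truck : Int × List Int := (10, [1, 2])

-- When the residual capacity equals the largest fitting leftover item and some two leftover
-- items also fit together, A returns early with a single extra item while B returns the
-- maximal item count, which is the intended max-count-then-max-weight loading.
def D_get_weights_on_truck (max_weight : Int) (items : List Int) : Prop :=
  ((pvCap max_weight items) ∈ items ∧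
    ¬(310 ≤ pvCap max_weight items ∧ pvCap max_weight items ≤ 320)) ∧
  ∃ x ∈ items, ∃ y ∈ items,
    ¬(310 ≤ x ∧ x ≤ 320) ∧ ¬(310 ≤ y ∧ y ≤ 320) ∧
    x ≤ pvCap max_weight items ∧ y ≤ pvCap max_weight items ∧
    x + y ≤ pvCap max_weight items ∧ (x = y → 2 ≤ items.count x)
instance (max_weight : Int) (items : List Int) : Decidable (D_get_weights_on_truck max_weight items) := by
  unfold D_get_weights_on_truck; infer_instance

def Spec_get_weights_on_truck (max_weight : Int) (items : List Int) (out : Int × Int) : Prop :=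
  ¬ D_get_weights_on_truck max_weight items → out = get_weights_on_truck_alt max_weight items
instance (max_weight : Int) (items : List Int) (out : Int × Int) : Decidable (Spec_get_weights_on_truck max_weight items out) := by
  unfold Spec_get_weights_on_truck; infer_instance

def pvDiffWitness_get_weights_on_truck : Int × List Int := (10, [10, 5, 5])
def pvDiffWitnessOut_get_weights_on_truck : (Int × Int) × (Int × Int) := ((1, 10), (2, 10))

-- ===== CLAIM (what is proved, stated in full; the proofs are below) =====
def Claim_unchanged_get_weights_on_truck : Prop := ∀ (max_weight : Int) (items : List Int), Dom_get_weights_on_truck max_weight items → Pre_get_weights_on_truck max_weight items → Spec_get_weights_on_truck max_weight items (get_weights_on_truck max_weight items)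
def Claim_exact_get_weights_on_truck : Prop := ∀ (max_weight : Int) (items : List Int), Dom_get_weights_on_truck max_weight items → Pre_get_weights_on_truck max_weight items → D_get_weights_on_truck max_weight items → get_weights_on_truck max_weight items ≠ get_weights_on_truck_alt max_weight items
def Claim_changed_get_weights_on_truck : Prop := Dom_get_weights_on_truck (pvDiffWitness_get_weights_on_truck.1) (pvDiffWitness_get_weights_on_truck.2) ∧ Pre_get_weights_on_truck (pvDiffWitness_get_weights_on_truck.1) (pvDiffWitness_get_weights_on_truck.2) ∧ D_get_weights_on_truck (pvDiffWitness_get_weights_on_truck.1) (pvDiffWitness_get_weights_on_truck.2) ∧ get_weights_on_truck (pvDiffWitness_get_weights_on_truck.1) (pvDiffWitness_get_weights_on_truck.2) = pvDiffWitnessOut_get_weights_on_truck.1 ∧ get_weights_on_truck_alt (pvDiffWitness_get_weights_on_truck.1) (pvDiffWitness_get_weights_on_truck.2) = pvDiffWitnessOut_get_weights_on_truck.2 ∧ pvDiffWitnessOut_get_weights_on_truck.1 ≠ pvDiffWitnessOut_get_weights_on_truck.2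

-- ===== LEMMAS AND PROOFS =====

-- the (count, weight) signature of one of A's placement options
def pvImg (o : List Int) : Int × Int := ((o.length : Int), o.sum)

-- membership after one DP step of B
lemma pv_mem_fold_add (cap x : Int) (p : Int × Int) :
    ∀ (l : List (Int × Int)) (S0 : PySem.Set (Int × Int)),
    (p ∈ l.foldl (fun S' (q : Int × Int) =>
        if q.2 + x ≤ cap then PySem.Set.add S' (q.1 + 1, q.2 + x) else S') S0)
      ↔ p ∈ S0 ∨ ∃ q ∈ l, q.2 + x ≤ cap ∧ p = (q.1 + 1, q.2 + x) := by
  intro l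
  induction l with
  | nil => simp
  | cons q t ih =>
    intro S0
    simp only [List.foldl_cons]
    by_cases h : q.2 + x ≤ cap
    · rw [if_pos h, ih]
      simp only [PySem.Set.mem_add, List.mem_cons]
      constructor
      · rintro ((hp | hp) | ⟨r, hr, hc, he⟩)
        · exact Or.inl hp
        · exact Or.inr ⟨q, Or.inl rfl, h, hp⟩
        · exact Or.inr ⟨r, Or.inr hr, hc, he⟩
      · rintro (hp | ⟨r, (rfl | hr), hc, he⟩)
        · exact Or.inl (Or.inl hp)
        · exact Or.inl (Or.inr he)
        · exact Or.inr ⟨r, hr, hc, he⟩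
    · rw [if_neg h, ih]
      simp only [List.mem_cons]
      constructor
      · rintro (hp | ⟨r, hr, hc, he⟩)
        · exact Or.inl hp
        · exact Or.inr ⟨r, Or.inr hr, hc, he⟩
      · rintro (hp | ⟨r, (rfl | hr), hc, he⟩)
        · exact Or.inl hp
        · exact absurd hc h
        · exact Or.inr ⟨r, hr, hc, he⟩

lemma pv_mem_Bstep (cap x : Int) (S : PySem.Set (Int × Int)) (p : Int × Int) :
    p ∈ pvBstep cap S x ↔
      p ∈ S ∨ (∃ q ∈ S, q.2 + x ≤ cap ∧ p = (q.1 + 1, q.2 + x)) ∨ p = (1, x) := by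
  unfold pvBstep
  rw [PySem.Set.mem_add, pv_mem_fold_add]
  exact or_assoc

-- the image of one step of A's option loop
lemma pv_mem_img_Astep (cap x : Int) (opts : List (List Int)) (p : Int × Int) :
    p ∈ (pvAstep cap opts x).map pvImg ↔
      p ∈ opts.map pvImg ∨
      (∃ q ∈ opts.map pvImg, q.2 + x ≤ cap ∧ p = (q.1 + 1, q.2 + x)) ∨ p = (1, x) := by
  have himg : ∀ o : List Int, pvImg (o ++ [x]) = ((o.length : Int) + 1, o.sum + x) := by
    intro o; simp [pvImg]
  have hx : pvImg [x] = (1, x) := by simp [pvImg]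
  unfold pvAstep
  rw [PySem.List.foldl_append_ite (p := fun o : List Int => o.sum + x ≤ cap ∧ (o ++ [x]) ∉ opts)
      (f := fun o => o ++ [x])]
  simp only [List.nil_append]
  set N := (opts.filter fun o => decide (o.sum + x ≤ cap ∧ (o ++ [x]) ∉ opts)).map (fun o => o ++ [x]) with hN
  have hmemN : ∀ q, q ∈ N ↔ ∃ o ∈ opts, (o.sum + x ≤ cap ∧ (o ++ [x]) ∉ opts) ∧ q = o ++ [x] := by
    intro q
    simp only [hN, List.mem_map, List.mem_filter, decide_eq_true_eq]
    constructor
    · rintro ⟨o, ⟨ho, hc⟩, rfl⟩; exact ⟨o, ho, hc, rfl⟩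
    · rintro ⟨o, ho, hc, rfl⟩; exact ⟨o, ⟨ho, hc⟩, rfl⟩
  have hmain : ∀ p : Int × Int, p ∈ (opts ++ N).map pvImg ↔
      p ∈ opts.map pvImg ∨ ∃ q ∈ opts.map pvImg, q.2 + x ≤ cap ∧ p = (q.1 + 1, q.2 + x) := by
    intro p
    simp only [List.map_append, List.mem_append]
    constructor
    · rintro (hp | hp)
      · exact Or.inl hp
      · obtain ⟨q, hq, rfl⟩ := List.mem_map.1 hp
        obtain ⟨o, ho, hc, rfl⟩ := (hmemN q).1 hq
        refine Or.inr ⟨pvImg o, List.mem_map.2 ⟨o, ho, rfl⟩, ?_, ?_⟩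
        · exact hc.1
        · rw [himg]; rfl
    · rintro (hp | ⟨q, hq, hcq, rfl⟩)
      · exact Or.inl hp
      · obtain ⟨o, ho, rfl⟩ := List.mem_map.1 hq
        by_cases hin : (o ++ [x]) ∈ opts
        · refine Or.inl (List.mem_map.2 ⟨o ++ [x], hin, ?_⟩)
          rw [himg]; rfl
        · refine Or.inr (List.mem_map.2 ⟨o ++ [x], (hmemN _).2 ⟨o, ho, ⟨?_, hin⟩, rfl⟩, ?_⟩)
          · exact hcq
          · rw [himg]; rfl
  by_cases hxx : [x] ∈ opts ++ N
  · rw [if_neg (not_not_intro hxx)]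
    constructor
    · intro hp
      rcases (hmain p).1 hp with h | h
      · exact Or.inl h
      · exact Or.inr (Or.inl h)
    · rintro (h | h | rfl)
      · exact (hmain p).2 (Or.inl h)
      · exact (hmain p).2 (Or.inr h)
      · exact List.mem_map.2 ⟨[x], hxx, hx⟩
  · rw [if_pos hxx]
    simp only [List.map_append, List.mem_append, List.map_cons, List.map_nil,
      List.mem_singleton] at *
    constructor
    · rintro ((hp | hp) | hp)
      · rcases (hmain p).1 (Or.inl hp) with h | h
        · exact Or.inl h
        · exact Or.inr (Or.inl h)
      · rcases (hmain p).1 (Or.inr hp) with h | h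
        · exact Or.inl h
        · exact Or.inr (Or.inl h)
      · exact Or.inr (Or.inr (hp.trans hx))
    · rintro (h | h | rfl)
      · rcases (hmain p).2 (Or.inl h) with h' | h'
        · exact Or.inl (Or.inl h')
        · exact Or.inl (Or.inr h')
      · rcases (hmain p).2 (Or.inr h) with h' | h'
        · exact Or.inl (Or.inl h')
        · exact Or.inl (Or.inr h')
      · exact Or.inr hx.symm

-- the DP invariant: B's state set has exactly the signatures of A's options
lemma pv_dp_invariant (cap : Int) :
    ∀ (rest : List Int) (opts : List (List Int)) (S : PySem.Set (Int × Int)),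
    (∀ p, p ∈ opts.map pvImg ↔ p ∈ S) →
    ∀ p, p ∈ (rest.foldl (pvAstep cap) opts).map pvImg ↔ p ∈ rest.foldl (pvBstep cap) S := by
  intro rest
  induction rest with
  | nil => intro opts S h p; simpa using h p
  | cons x t ih =>
    intro opts S h p
    simp only [List.foldl_cons]
    refine ih _ _ (fun q => ?_) p
    rw [pv_mem_img_Astep, pv_mem_Bstep]
    constructor
    · rintro (hq | ⟨r, hr, hc, he⟩ | hq)
      · exact Or.inl ((h q).1 hq)
      · exact Or.inr (Or.inl ⟨r, (h r).1 hr, hc, he⟩)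
      · exact Or.inr (Or.inr hq)
    · rintro (hq | ⟨r, hr, hc, he⟩ | hq)
      · exact Or.inl ((h q).2 hq)
      · exact Or.inr (Or.inl ⟨r, (h r).2 hr, hc, he⟩)
      · exact Or.inr (Or.inr hq)

-- max of two lists with the same members
lemma pv_max_ext (l1 l2 : List Int) (h : ∀ a, a ∈ l1 ↔ a ∈ l2) :
    PySem.List.max? l1 (fun v => v) = PySem.List.max? l2 (fun v => v) := by
  cases e1 : PySem.List.max? l1 (fun v => v) with
  | none =>
    rw [PySem.List.max?_eq_none_iff] at e1
    have h2 : l2 = [] := by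
      rw [List.eq_nil_iff_forall_not_mem]
      intro a ha
      exact (List.not_mem_nil (a := a)) (by simpa [e1] using (h a).2 ha)
    rw [(PySem.List.max?_eq_none_iff (xs := l2) (key := fun v => v)).2 h2]
  | some m =>
    have hm : m ∈ l1 := PySem.List.max?_mem e1
    have hmax : ∀ y ∈ l1, y ≤ m := PySem.List.max?_isMax e1
    cases e2 : PySem.List.max? l2 (fun v => v) with
    | none =>
      rw [PySem.List.max?_eq_none_iff] at e2
      exact absurd ((h m).1 hm) (by simp [e2])
    | some m' =>
      have hm' : m' ∈ l2 := PySem.List.max?_mem e2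
      have hmax' : ∀ y ∈ l2, y ≤ m' := PySem.List.max?_isMax e2
      have := hmax' m ((h m).1 hm)
      have := hmax m' ((h m').2 hm')
      exact congrArg some (le_antisymm ‹m ≤ m'› ‹m' ≤ m›)

-- pvResidual is max_weight minus the greedily loaded weight
lemma pvResidual_eq (mw : Int) :
    ∀ (ws : List Int) (w : Int),
    pvResidual (mw - w) ws
      = mw - ws.foldl (fun w i => if (310 ≤ i ∧ i ≤ 320) ∧ w + i ≤ mw then w + i else w) w := by
  intro ws
  induction ws with
  | nil => intro w; rfl
  | cons a rest ih =>
    intro w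
    simp only [pvResidual, List.foldl_cons]
    by_cases hc : (310 ≤ a ∧ a ≤ 320) ∧ w + a ≤ mw
    · rw [if_pos ⟨hc.1.1, hc.1.2, by omega⟩, if_pos hc, show mw - w - a = mw - (w + a) by ring]
      exact ih (w + a)
    · rw [if_neg (fun h => hc ⟨⟨h.1, h.2.1⟩, by omega⟩), if_neg hc]
      exact ih w

-- the greedy pre-loading loops of A and B stay coupled
lemma pv_load_couple (mw : Int) :
    ∀ (xs : List Int) (t l : List Int),
    ((xs.foldl (pvAload mw) (t, t.sum, l)).1.length : Int)
        = (xs.foldl (pvBload mw) ((t.length : Int), t.sum)).1 ∧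
    (xs.foldl (pvAload mw) (t, t.sum, l)).1.sum
        = (xs.foldl (pvBload mw) ((t.length : Int), t.sum)).2 ∧
    (xs.foldl (pvAload mw) (t, t.sum, l)).2.1
        = (xs.foldl (pvBload mw) ((t.length : Int), t.sum)).2 ∧
    (xs.foldl (pvAload mw) (t, t.sum, l)).2.2
        = l ++ xs.filter (fun i => decide (¬(310 ≤ i ∧ i ≤ 320))) := by
  intro xs
  induction xs with
  | nil => intro t l; simp
  | cons x xs ih =>
    intro t l
    simp only [List.foldl_cons, pvAload, pvBload]
    by_cases hr : 310 ≤ x ∧ x ≤ 320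
    · by_cases hw : t.sum + x ≤ mw
      · rw [if_pos hr]
        simp only [if_pos hw, if_pos (show (310 ≤ x ∧ x ≤ 320) ∧ (((t.length : Int), t.sum) : Int × Int).2 + x ≤ mw from ⟨hr, hw⟩)]
        have := ih (t ++ [x]) l
        simp only [List.sum_append, List.length_append, List.sum_cons, List.sum_nil,
          List.length_cons, List.length_nil, add_zero, Nat.cast_add, Nat.cast_one] at this ⊢
        convert this using 3; simp [hr]
      · rw [if_pos hr]
        simp only [if_neg hw, if_neg (show ¬((310 ≤ x ∧ x ≤ 320) ∧ (((t.length : Int), t.sum) : Int × Int).2 + x ≤ mw) from fun hc => hw hc.2)]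
        have := ih t l
        simpa [List.filter_cons, hr] using this
    · rw [if_neg hr]
      simp only [if_neg (show ¬((310 ≤ x ∧ x ≤ 320) ∧ (((t.length : Int), t.sum) : Int × Int).2 + x ≤ mw) from fun hc => hr hc.1)]
      have := ih t (l ++ [x])
      have hx : x < 310 ∨ 320 < x := by omega
      simpa [List.filter_cons, hr, hx] using this

-- B's loaded weight is pvTruckW's fold
lemma pv_bload_weight (mw : Int) :
    ∀ (xs : List Int) (c w : Int),
    (xs.foldl (pvBload mw) (c, w)).2
      = xs.foldl (fun w i => if (310 ≤ i ∧ i ≤ 320) ∧ w + i ≤ mw then w + i else w) w := by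
  intro xs
  induction xs with
  | nil => intro c w; rfl
  | cons x t ih =>
    intro c w
    simp only [List.foldl_cons, pvBload]
    split_ifs with h
    · exact ih _ _
    · exact ih _ _

-- DP result when no two leftover items fit together: only singleton states
lemma pv_dp_nopair (cap : Int) :
    ∀ (rem done : List Int) (S : PySem.Set (Int × Int)),
    (∀ p, p ∈ S ↔ ∃ x ∈ done, p = ((1 : Int), x)) →
    (∀ x ∈ done, ∀ y ∈ rem, cap < x + y) →
    rem.Pairwise (fun a b => cap < a + b) →
    ∀ p, p ∈ rem.foldl (pvBstep cap) S ↔ ∃ x ∈ done ++ rem, p = ((1 : Int), x) := by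
  intro rem
  induction rem with
  | nil => intro done S hS _ _ p; simpa using hS p
  | cons y rem' ih =>
    intro done S hS hcross hpair p
    simp only [List.foldl_cons]
    have hS' : ∀ p, p ∈ pvBstep cap S y ↔ ∃ x ∈ done ++ [y], p = ((1 : Int), x) := by
      intro p
      rw [pv_mem_Bstep]
      constructor
      · rintro (hp | ⟨q, hq, hc, rfl⟩ | rfl)
        · obtain ⟨z, hz, rfl⟩ := (hS p).1 hp
          exact ⟨z, List.mem_append_left _ hz, rfl⟩
        · obtain ⟨z, hz, hq2⟩ := (hS q).1 hq
          have : q.2 = z := by rw [hq2]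
          have hlt := hcross z hz y (List.mem_cons_self)
          omega
        · exact ⟨y, List.mem_append_right _ (List.mem_singleton_self y), rfl⟩
      · rintro ⟨z, hz, rfl⟩
        rcases List.mem_append.1 hz with hz | hz
        · exact Or.inl ((hS _).2 ⟨z, hz, rfl⟩)
        · rcases List.mem_singleton.1 hz with rfl
          exact Or.inr (Or.inr rfl)
    have hcross' : ∀ z ∈ done ++ [y], ∀ w ∈ rem', cap < z + w := by
      intro z hz w hw
      rcases List.mem_append.1 hz with hz | hz
      · exact hcross z hz w (List.mem_cons_of_mem _ hw)
      · rcases List.mem_singleton.1 hz with rfl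
        exact (List.pairwise_cons.1 hpair).1 w hw
    have := ih (done ++ [y]) (pvBstep cap S y) hS' hcross' (List.pairwise_cons.1 hpair).2 p
    simpa [List.append_assoc] using this

-- B's DP state set only grows
lemma pv_step_mono (cap z : Int) (S : PySem.Set (Int × Int)) (p : Int × Int) (h : p ∈ S) :
    p ∈ pvBstep cap S z :=
  (pv_mem_Bstep cap z S p).2 (Or.inl h)

lemma pv_fold_mono (cap : Int) :
    ∀ (l : List Int) (S : PySem.Set (Int × Int)) (p : Int × Int),
    p ∈ S → p ∈ l.foldl (pvBstep cap) S := by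
  intro l
  induction l with
  | nil => intro S p h; exact h
  | cons z t ih =>
    intro S p h
    exact ih _ _ (pv_step_mono cap z S p h)

-- once (1, a) is a state, a later item b with a + b ≤ cap yields the state (2, a + b)
lemma pv_reach_second (cap a : Int) :
    ∀ (t : List Int) (S : PySem.Set (Int × Int)),
    ((1 : Int), a) ∈ S → ∀ b ∈ t, a + b ≤ cap → ((2 : Int), a + b) ∈ t.foldl (pvBstep cap) S := by
  intro t
  induction t with
  | nil => intro S _ b hb; simp at hb
  | cons c t' ih =>
    intro S h1 b hb hab
    rcases List.mem_cons.1 hb with rfl | hb'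
    · have h2 : ((2 : Int), a + b) ∈ pvBstep cap S b :=
        (pv_mem_Bstep cap b S _).2 (Or.inr (Or.inl ⟨(1, a), h1, by simpa using hab, by norm_num⟩))
      exact pv_fold_mono cap t' _ _ h2
    · exact ih _ (pv_step_mono cap c S _ h1) b hb' hab

-- a fitting pair reaches a count-2 state
lemma pv_reach_pair (cap : Int) :
    ∀ (l : List Int) (S : PySem.Set (Int × Int)) (a b : Int),
    [a, b].Sublist l → a + b ≤ cap → ((2 : Int), a + b) ∈ l.foldl (pvBstep cap) S := by
  intro l
  induction l with
  | nil => intro S a b h; simp at h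
  | cons z t ih =>
    intro S a b hs hab
    cases hs with
    | cons _ h => exact ih _ a b h hab
    | cons₂ _ h =>
      have h1a : ((1 : Int), z) ∈ pvBstep cap S z :=
        (pv_mem_Bstep cap z S _).2 (Or.inr (Or.inr rfl))
      exact pv_reach_second cap z t _ h1a b (List.singleton_sublist.1 h) hab

-- two members at distinct positions give a two-element sublist in one order or the other
lemma pv_pair_sublist {x y : Int} :
    ∀ (l : List Int), x ∈ l → y ∈ l → x ≠ y → [x, y].Sublist l ∨ [y, x].Sublist l := by
  intro l
  induction l with
  | nil => simp
  | cons z t ih =>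
    intro hx hy hne
    rcases List.mem_cons.1 hx with rfl | hx'
    · have hy' : y ∈ t := by
        rcases List.mem_cons.1 hy with h | h
        · exact absurd h.symm hne
        · exact h
      exact Or.inl (List.Sublist.cons₂ _ (List.singleton_sublist.2 hy'))
    · rcases List.mem_cons.1 hy with rfl | hy'
      · exact Or.inr (List.Sublist.cons₂ _ (List.singleton_sublist.2 hx'))
      · rcases ih hx' hy' hne with h | h
        · exact Or.inl (h.cons z)
        · exact Or.inr (h.cons z)

-- the two final max-extractions agree when the membership invariant holds
lemma pv_extract_len (options : List (List Int)) (states : PySem.Set (Int × Int))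
    (himg : ∀ p, p ∈ options.map pvImg ↔ p ∈ states) :
    PySem.List.max? (options.map (fun o => (o.length : Int))) (fun v => v)
      = PySem.List.max? (states.map (fun p => p.1)) (fun v => v) := by
  apply pv_max_ext
  intro a
  constructor
  · intro ha
    obtain ⟨o, ho, rfl⟩ := List.mem_map.1 ha
    exact List.mem_map.2 ⟨pvImg o, (himg _).1 (List.mem_map.2 ⟨o, ho, rfl⟩), rfl⟩
  · intro ha
    obtain ⟨p, hp, rfl⟩ := List.mem_map.1 ha
    obtain ⟨o, ho, hoi⟩ := List.mem_map.1 ((himg p).2 hp)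
    exact List.mem_map.2 ⟨o, ho, by rw [← hoi]; rfl⟩

lemma pv_extract_sum (options : List (List Int)) (states : PySem.Set (Int × Int))
    (himg : ∀ p, p ∈ options.map pvImg ↔ p ∈ states) (m : Int) :
    PySem.List.max? ((options.filter (fun o => decide ((o.length : Int) = m))).map (fun o => o.sum)) (fun v => v)
      = PySem.List.max? ((states.filter (fun p => decide (p.1 = m))).map (fun p => p.2)) (fun v => v) := by
  apply pv_max_ext
  intro s
  constructor
  · intro hs
    obtain ⟨o, ho, rfl⟩ := List.mem_map.1 hs
    obtain ⟨ho1, ho2⟩ := List.mem_filter.1 ho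
    have hm : (o.length : Int) = m := by simpa using ho2
    have hst : (m, o.sum) ∈ states := by
      refine (himg _).1 (List.mem_map.2 ⟨o, ho1, ?_⟩)
      show ((o.length : Int), o.sum) = (m, o.sum)
      rw [hm]
    exact List.mem_map.2 ⟨(m, o.sum), List.mem_filter.2 ⟨hst, by simp⟩, rfl⟩
  · intro hs
    obtain ⟨p, hp, rfl⟩ := List.mem_map.1 hs
    obtain ⟨hp1, hp2⟩ := List.mem_filter.1 hp
    have hm : p.1 = m := by simpa using hp2
    obtain ⟨o, ho, hoi⟩ := List.mem_map.1 ((himg p).2 hp1)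
    refine List.mem_map.2 ⟨o, List.mem_filter.2 ⟨ho, ?_⟩, ?_⟩
    · have : (o.length : Int) = p.1 := by rw [← hoi]; rfl
      simp [this, hm]
    · show o.sum = p.2
      rw [← hoi]; rfl

-- ===== VERDICT (by name: the statement is the Claim_ definition above) =====
theorem get_weights_on_truck_spec : Claim_unchanged_get_weights_on_truck := by
  intro mw items hdom hpre hnd
  show get_weights_on_truck mw items = get_weights_on_truck_alt mw items
  unfold get_weights_on_truck get_weights_on_truck_alt
  by_cases hnil : PySem.List.sorted items (fun x => x) true = []
  · rw [if_pos hnil, if_pos hnil]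
  · rw [if_neg hnil, if_neg hnil]
    set order := PySem.List.sorted items (fun x => x) true with horder
    obtain ⟨h1, h2, h3, h4⟩ := pv_load_couple mw order [] []
    simp only [List.sum_nil, List.length_nil, Nat.cast_zero] at h1 h2 h3 h4
    dsimp only
    rw [h3, h4, List.nil_append]
    have hw : pvCap mw items = mw - (List.foldl (pvBload mw) (0, 0) order).2 := by
      unfold pvCap
      rw [← horder, pv_bload_weight]
      have h0 := pvResidual_eq mw order 0
      rw [sub_zero] at h0
      exact h0
    have hrest : (List.filter (fun i => decide ¬(310 ≤ i ∧ i ≤ 320)) order).filter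
        (fun i => decide (i ≤ mw - (List.foldl (pvBload mw) (0, 0) order).2))
        = List.filter (fun i => decide (¬(310 ≤ i ∧ i ≤ 320) ∧ i ≤ mw - (List.foldl (pvBload mw) (0, 0) order).2)) order := by
      rw [List.filter_filter]
      apply List.filter_congr
      intro a _
      simp [Bool.and_comm]
    rw [hrest]
    have hitems_ne : items ≠ [] := by
      intro h
      exact hnil (by rw [horder, h]; rfl)
    cases hR : List.filter (fun i => decide (¬(310 ≤ i ∧ i ≤ 320) ∧ i ≤ mw - (List.foldl (pvBload mw) (0, 0) order).2)) order with
    | nil =>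
      exfalso
      rcases hpre with h | h
      · exact hitems_ne h
      · obtain ⟨x, hx, hbx, hlex⟩ := h
        have hxmem : x ∈ List.filter (fun i => decide (¬(310 ≤ i ∧ i ≤ 320) ∧ i ≤ mw - (List.foldl (pvBload mw) (0, 0) order).2)) order := by
          refine List.mem_filter.2 ⟨by rw [horder]; exact (PySem.List.mem_sorted _ _ _ _).2 hx, ?_⟩
          exact decide_eq_true ⟨hbx, by rw [← hw]; exact hlex⟩
        rw [hR] at hxmem
        exact (List.not_mem_nil).elim hxmem
    | cons i0 rest' =>
      dsimp only
      rw [if_neg (List.cons_ne_nil i0 rest')]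
      have hmem : i0 ∈ List.filter (fun i => decide (¬(310 ≤ i ∧ i ≤ 320) ∧ i ≤ mw - (List.foldl (pvBload mw) (0, 0) order).2)) order := by
        rw [hR]; exact List.mem_cons_self
      have hi0 : ¬(310 ≤ i0 ∧ i0 ≤ 320) ∧ i0 ≤ mw - (List.foldl (pvBload mw) (0, 0) order).2 :=
        of_decide_eq_true (List.mem_filter.1 hmem).2
      rw [if_neg (not_lt.2 hi0.2)]
      -- every element of the leftover list lies in items, outside the band, and fits the capacity
      have hfact : ∀ z ∈ i0 :: rest', z ∈ items ∧ ¬(310 ≤ z ∧ z ≤ 320) ∧ z ≤ pvCap mw items := by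
        intro z hz
        have hz' : z ∈ List.filter (fun i => decide (¬(310 ≤ i ∧ i ≤ 320) ∧ i ≤ mw - (List.foldl (pvBload mw) (0, 0) order).2)) order := by
          rw [hR]; exact hz
        obtain ⟨hzo, hzp⟩ := List.mem_filter.1 hz'
        have hzp' := of_decide_eq_true hzp
        exact ⟨(PySem.List.mem_sorted _ _ _ _).1 (horder ▸ hzo), hzp'.1, by rw [hw]; exact hzp'.2⟩
      have hdesc : (i0 :: rest').Pairwise (fun a b : Int => b ≤ a) := by
        have hs := PySem.List.sorted_pairwise_rev (xs := items) (key := fun x => x)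
        rw [← horder] at hs
        exact hR ▸ (hs.sublist List.filter_sublist)
      by_cases hceq : mw - (List.foldl (pvBload mw) (0, 0) order).2 = i0
      · rw [if_pos hceq]
        have hpair : (i0 :: rest').Pairwise
            (fun a b => mw - (List.foldl (pvBload mw) (0, 0) order).2 < a + b) := by
          rw [List.pairwise_iff_forall_sublist]
          intro a b hsub
          by_contra hab
          rw [not_lt] at hab
          apply hnd
          unfold D_get_weights_on_truck
          have hcap' : pvCap mw items = i0 := by rw [hw]; exact hceq
          have ha := hfact a (hsub.subset (by simp))
          have hb := hfact b (hsub.subset (by simp))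
          constructor
          · rw [hcap']
            exact ⟨(hfact i0 List.mem_cons_self).1, hi0.1⟩
          · refine ⟨a, ha.1, b, hb.1, ha.2.1, hb.2.1, ha.2.2, hb.2.2, by rw [hw]; exact hab, ?_⟩
            intro heq
            have h2 : 2 ≤ (i0 :: rest').count a := by
              have := hsub.count_le a
              simpa [heq] using this
            calc (2 : Nat) ≤ (i0 :: rest').count a := h2
              _ ≤ order.count a := by rw [← hR]; exact List.filter_sublist.count_le a
              _ = items.count a := ((PySem.List.sorted_perm items (fun x => x) true).count_eq a).trans rfl
        have hstates : ∀ p, p ∈ List.foldl (pvBstep (mw - (List.foldl (pvBload mw) (0, 0) order).2)) PySem.Set.empty (i0 :: rest')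
            ↔ ∃ z ∈ i0 :: rest', p = ((1 : Int), z) := by
          have := pv_dp_nopair (mw - (List.foldl (pvBload mw) (0, 0) order).2) (i0 :: rest') [] PySem.Set.empty
            (by intro p; simp [PySem.Set.empty]) (by intro z hz; simp at hz) hpair
          simpa using this
        have hBC : PySem.List.max? (List.map (fun p => p.1)
            (List.foldl (pvBstep (mw - (List.foldl (pvBload mw) (0, 0) order).2)) PySem.Set.empty (i0 :: rest'))) (fun v => v) = some 1 := by
          rw [pv_max_ext _ [1] ?_]
          · decide
          · intro a
            constructor
            · intro ha
              obtain ⟨p, hp, rfl⟩ := List.mem_map.1 ha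
              obtain ⟨z, hz, rfl⟩ := (hstates p).1 hp
              simp
            · intro ha
              rcases List.mem_singleton.1 ha with rfl
              exact List.mem_map.2 ⟨(1, i0), (hstates _).2 ⟨i0, List.mem_cons_self, rfl⟩, rfl⟩
        rw [hBC]
        have hBS : PySem.List.max? (List.map (fun p => p.2)
            (List.filter (fun p => decide (p.1 = (some (1 : Int)).getD 0))
              (List.foldl (pvBstep (mw - (List.foldl (pvBload mw) (0, 0) order).2)) PySem.Set.empty (i0 :: rest')))) (fun v => v) = some i0 := by
          rw [pv_max_ext _ (i0 :: rest') ?_]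
          · rw [PySem.List.max?_id_cons]
            refine congrArg some ?_
            rcases PySem.List.foldl_max_mem rest' i0 with he | hm
            · exact he
            · exact le_antisymm ((List.pairwise_cons.1 hdesc).1 _ hm) (PySem.List.le_foldl_max rest' i0).1
          · intro s
            constructor
            · intro hs
              obtain ⟨p, hp, rfl⟩ := List.mem_map.1 hs
              obtain ⟨hp1, _⟩ := List.mem_filter.1 hp
              obtain ⟨z, hz, rfl⟩ := (hstates p).1 hp1
              exact hz
            · intro hs
              refine List.mem_map.2 ⟨(1, s), List.mem_filter.2 ⟨(hstates _).2 ⟨s, hs, rfl⟩, by simp⟩, rfl⟩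
        rw [hBS, h1, h2]
        rfl
      · rw [if_neg hceq]
        have hSfold : List.foldl (pvBstep (mw - (List.foldl (pvBload mw) (0, 0) order).2)) PySem.Set.empty (i0 :: rest')
            = List.foldl (pvBstep (mw - (List.foldl (pvBload mw) (0, 0) order).2)) [((1 : Int), i0)] rest' := by
          rw [List.foldl_cons]; rfl
        rw [hSfold]
        have himg : ∀ p, p ∈ (List.foldl (pvAstep (mw - (List.foldl (pvBload mw) (0, 0) order).2)) [[i0]] rest').map pvImg
            ↔ p ∈ List.foldl (pvBstep (mw - (List.foldl (pvBload mw) (0, 0) order).2)) [((1 : Int), i0)] rest' :=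
          pv_dp_invariant _ rest' [[i0]] [((1 : Int), i0)] (by intro p; simp [pvImg])
        have hlen := pv_extract_len _ _ himg
        rw [hlen]
        have hsum := pv_extract_sum _ _ himg
          ((PySem.List.max? (List.map (fun p => p.1) (List.foldl (pvBstep (mw - (List.foldl (pvBload mw) (0, 0) order).2)) [((1 : Int), i0)] rest')) (fun v => v)).getD 0)
        rw [hsum, h1, h2]
        simp [Int.add_comm]

theorem get_weights_on_truck_changed : Claim_changed_get_weights_on_truck := by
  unfold Claim_changed_get_weights_on_truck; decide

theorem get_weights_on_truck_tight : Claim_exact_get_weights_on_truck := by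
  intro mw items hdom hpre hD
  obtain ⟨⟨hcmem, hcband⟩, x, hxi, y, hyi, hbx, hby, hxle, hyle, hsum, hcnt⟩ := hD
  have hitems_ne : items ≠ [] := List.ne_nil_of_mem hcmem
  unfold get_weights_on_truck get_weights_on_truck_alt
  by_cases hnil : PySem.List.sorted items (fun x => x) true = []
  · exfalso
    apply hitems_ne
    rwa [PySem.List.sorted_eq_nil_iff] at hnil
  · rw [if_neg hnil, if_neg hnil]
    set order := PySem.List.sorted items (fun x => x) true with horder
    obtain ⟨h1, h2, h3, h4⟩ := pv_load_couple mw order [] []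
    simp only [List.sum_nil, List.length_nil, Nat.cast_zero] at h1 h2 h3 h4
    dsimp only
    rw [h3, h4, List.nil_append]
    have hw : pvCap mw items = mw - (List.foldl (pvBload mw) (0, 0) order).2 := by
      unfold pvCap
      rw [← horder, pv_bload_weight]
      have h0 := pvResidual_eq mw order 0
      rw [sub_zero] at h0
      exact h0
    have hrest : (List.filter (fun i => decide ¬(310 ≤ i ∧ i ≤ 320)) order).filter
        (fun i => decide (i ≤ mw - (List.foldl (pvBload mw) (0, 0) order).2))
        = List.filter (fun i => decide (¬(310 ≤ i ∧ i ≤ 320) ∧ i ≤ mw - (List.foldl (pvBload mw) (0, 0) order).2)) order := by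
      rw [List.filter_filter]
      apply List.filter_congr
      intro a _
      simp [Bool.and_comm]
    rw [hrest]
    have hmemrest : ∀ z, z ∈ items → ¬(310 ≤ z ∧ z ≤ 320) → z ≤ pvCap mw items →
        z ∈ List.filter (fun i => decide (¬(310 ≤ i ∧ i ≤ 320) ∧ i ≤ mw - (List.foldl (pvBload mw) (0, 0) order).2)) order := by
      intro z hz hb hle
      refine List.mem_filter.2 ⟨by rw [horder]; exact (PySem.List.mem_sorted _ _ _ _).2 hz, ?_⟩
      exact decide_eq_true ⟨hb, by rw [← hw]; exact hle⟩
    have hcmem' := hmemrest _ hcmem hcband (le_refl _)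
    cases hR : List.filter (fun i => decide (¬(310 ≤ i ∧ i ≤ 320) ∧ i ≤ mw - (List.foldl (pvBload mw) (0, 0) order).2)) order with
    | nil =>
      rw [hR] at hcmem'
      exact absurd hcmem' List.not_mem_nil
    | cons i0 rest' =>
      dsimp only
      rw [if_neg (List.cons_ne_nil i0 rest')]
      have hmem : i0 ∈ List.filter (fun i => decide (¬(310 ≤ i ∧ i ≤ 320) ∧ i ≤ mw - (List.foldl (pvBload mw) (0, 0) order).2)) order := by
        rw [hR]; exact List.mem_cons_self
      have hi0 : ¬(310 ≤ i0 ∧ i0 ≤ 320) ∧ i0 ≤ mw - (List.foldl (pvBload mw) (0, 0) order).2 :=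
        of_decide_eq_true (List.mem_filter.1 hmem).2
      rw [if_neg (not_lt.2 hi0.2)]
      have hdesc : (i0 :: rest').Pairwise (fun a b : Int => b ≤ a) := by
        have hs := PySem.List.sorted_pairwise_rev (xs := items) (key := fun x => x)
        rw [← horder] at hs
        exact hR ▸ (hs.sublist List.filter_sublist)
      have hceq : mw - (List.foldl (pvBload mw) (0, 0) order).2 = i0 := by
        have hcr : pvCap mw items ∈ i0 :: rest' := by rw [← hR]; exact hcmem'
        have hle1 : pvCap mw items ≤ i0 := by
          rcases List.mem_cons.1 hcr with h | h
          · exact le_of_eq h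
          · exact (List.pairwise_cons.1 hdesc).1 _ h
        have hge : i0 ≤ pvCap mw items := by rw [hw]; exact hi0.2
        rw [← hw]
        omega
      rw [if_pos hceq]
      have hx' := hmemrest _ hxi hbx hxle
      have hy' := hmemrest _ hyi hby hyle
      rw [hR] at hx' hy'
      have hpairsub : ∃ a b : Int, [a, b].Sublist (i0 :: rest')
          ∧ a + b ≤ mw - (List.foldl (pvBload mw) (0, 0) order).2 := by
        by_cases hxy : x = y
        · subst hxy
          have hc2 : 2 ≤ (i0 :: rest').count x := by
            calc (2 : Nat) ≤ items.count x := hcnt rfl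
              _ = order.count x := by
                  rw [horder]
                  exact ((PySem.List.sorted_perm items (fun x => x) true).count_eq x).symm
              _ = (i0 :: rest').count x := by
                  rw [← hR]
                  exact (List.count_filter (by
                    exact decide_eq_true ⟨hbx, by rw [← hw]; exact hxle⟩)).symm
          have hrep := List.replicate_sublist_iff.mpr hc2
          exact ⟨x, x, by simpa using hrep, by rw [← hw]; omega⟩
        · rcases pv_pair_sublist (i0 :: rest') hx' hy' hxy with h | h
          · exact ⟨x, y, h, by rw [← hw]; exact hsum⟩
          · exact ⟨y, x, h, by rw [← hw]; omega⟩
      obtain ⟨a, b, hsubl, hab⟩ := hpairsub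
      have h2st : ((2 : Int), a + b) ∈ (i0 :: rest').foldl
          (pvBstep (mw - (List.foldl (pvBload mw) (0, 0) order).2)) PySem.Set.empty :=
        pv_reach_pair _ _ _ a b hsubl hab
      have h2map : (2 : Int) ∈ List.map (fun p => p.1) ((i0 :: rest').foldl
          (pvBstep (mw - (List.foldl (pvBload mw) (0, 0) order).2)) PySem.Set.empty) :=
        List.mem_map.2 ⟨_, h2st, rfl⟩
      cases e : PySem.List.max? (List.map (fun p => p.1) ((i0 :: rest').foldl
          (pvBstep (mw - (List.foldl (pvBload mw) (0, 0) order).2)) PySem.Set.empty)) (fun v => v) with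
      | none =>
        rw [PySem.List.max?_eq_none_iff] at e
        rw [e] at h2map
        exact absurd h2map List.not_mem_nil
      | some m =>
        have hm2 : 2 ≤ m := PySem.List.max?_isMax e _ h2map
        intro hcontra
        have hfst := congrArg Prod.fst hcontra
        simp only [Option.getD_some] at hfst
        rw [h1] at hfst
        omega
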